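-- pv_equiv track=rewrite | github.com/huge-head-dino/algorithm | 프로그래머스/0/181909. 접미사 배열/접미사 배열.py | solution
-- ===== SOURCE A (Python) =====
-- def solution(my_string):
--     answer = []
--     temp = list(my_string)
--     for i in range(len(my_string)):
--         target = temp[i:len(my_string)+1]
--         str_target = ''.join(target)
--         answer.append(str_target)
--     answer = sorted(answer)
--     return answer
-- ===== SOURCE B (Python) =====
-- def solution(my_string):
--     # Build every suffix in one backward pass: each suffix is one new
--     # character prepended to the previous (shorter) suffix; then sort.
--     suffixes = []
--     cur = ''
--     for ch in reversed(my_string):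
--         cur = ch + cur
--         suffixes.append(cur)
--     return sorted(suffixes)
-- ===== Notes on version B (the rewrite author's own statement) =====
-- stated objective: alternative
-- what changed: B builds the suffixes in a single backward pass by prepending each character to the previous suffix (no per-index slicing/join), then sorts; A slices and joins a fresh suffix for every index in a forward loop.
import Mathlib
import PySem

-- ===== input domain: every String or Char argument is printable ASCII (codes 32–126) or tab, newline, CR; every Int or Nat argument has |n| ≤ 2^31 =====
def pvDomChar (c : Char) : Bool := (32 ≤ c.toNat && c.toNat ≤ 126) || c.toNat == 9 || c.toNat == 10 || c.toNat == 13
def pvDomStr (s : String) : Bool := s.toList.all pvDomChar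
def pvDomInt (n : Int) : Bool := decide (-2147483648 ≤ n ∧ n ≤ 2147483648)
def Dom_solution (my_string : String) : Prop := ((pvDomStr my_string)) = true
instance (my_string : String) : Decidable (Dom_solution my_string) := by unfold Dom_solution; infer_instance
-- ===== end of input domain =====

-- B builds the suffixes in one backward pass (prepend a char to the previous suffix),
-- A slices out and joins a fresh suffix for every index; same sorted result.

-- ===== PORT A =====
def solution (my_string : String) : List String :=
  let temp := my_string.toList
  let n : Int := (temp.length : Int)
  let answer := (PySem.List.pyRange 0 n 1).foldl
    (fun acc i => acc ++ [String.mk (PySem.List.slice temp (some i) (some (n + 1)))]) []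
  PySem.List.sorted answer (fun x => x) false

-- ===== PORT B =====
def solution_alt (my_string : String) : List String :=
  let p := my_string.toList.reverse.foldl
    (fun (st : List Char × List String) ch =>
      let cur := ch :: st.1
      (cur, st.2 ++ [String.mk cur])) ([], [])
  PySem.List.sorted p.2 (fun x => x) false

-- ===== PRECONDITION & SPEC =====
def Spec_solution (my_string : String) (out : List String) : Prop := out = solution_alt my_string
instance (my_string : String) (out : List String) : Decidable (Spec_solution my_string out) := by unfold Spec_solution; infer_instance

-- ===== CLAIM (what is proved, stated in full; the proofs are below) =====
def Claim_equal_solution : Prop := ∀ (my_string : String), Dom_solution my_string → Spec_solution my_string (solution my_string)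

-- ===== LEMMAS AND PROOFS =====

theorem foldl_snoc {α β : Type} (f : α → β) (xs : List α) (acc : List β) :
    xs.foldl (fun a x => a ++ [f x]) acc = acc ++ xs.map f := by
  induction xs generalizing acc with
  | nil => simp
  | cons x xs ih => simp [List.foldl, ih]

-- the suffix strings appended by B's backward pass, in emission order
def sufList : List Char → List Char → List String
  | [], _ => []
  | c :: rest, cur => String.mk (c :: cur) :: sufList rest (c :: cur)

theorem foldl_B (l : List Char) (cur : List Char) (acc : List String) :
    (l.foldl (fun (st : List Char × List String) ch =>
        let cur := ch :: st.1
        (cur, st.2 ++ [String.mk cur])) (cur, acc)).2 = acc ++ sufList l cur := by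
  induction l generalizing cur acc with
  | nil => simp [sufList]
  | cons c rest ih => simp [List.foldl, sufList, ih]

theorem sufList_reverse (t : List Char) (cur : List Char) :
    sufList t.reverse cur
      = ((List.range t.length).map (fun i => String.mk (t.drop i ++ cur))).reverse := by
  induction t using List.reverseRecOn generalizing cur with
  | nil => simp [sufList]
  | append_singleton t' c ih =>
    have h2 : ∀ a ∈ List.range t'.length,
        String.mk (t'.drop a ++ (c :: cur)) = String.mk ((t' ++ [c]).drop a ++ cur) := by
      intro a ha
      rw [List.mem_range] at ha
      rw [List.drop_append_of_le_length (le_of_lt ha)]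
      simp
    rw [List.reverse_append, List.reverse_singleton, List.singleton_append, sufList,
      ih (c :: cur), List.map_congr_left h2,
      List.length_append, List.length_singleton, List.range_succ, List.map_append,
      List.reverse_append]
    simp

theorem range_map_pyRange {α : Type} (n : Nat) (f : Int → α) :
    (PySem.List.pyRange 0 (n : Int) 1).map f = (List.range n).map (fun k => f (Int.ofNat k)) := by
  have h : (((n : Int)) - 0).toNat = n := by omega
  rw [PySem.List.pyRange_one, h, List.map_map]
  apply List.map_congr_left
  intro k _
  simp

-- ===== VERDICT (by name: the statement is the Claim_ definition above) =====
theorem solution_spec : Claim_equal_solution := by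
  intro s _
  unfold Spec_solution solution solution_alt
  set t := s.toList with ht
  simp only []
  rw [foldl_snoc, List.nil_append, foldl_B, List.nil_append, sufList_reverse]
  apply PySem.List.sorted_eq_sorted_of_perm
  · exact fun a b h => h
  · -- reduce A's mapped list to the same suffix list, then use reverse_perm
    have hmap : (PySem.List.pyRange 0 (t.length : Int) 1).map
        (fun i => String.mk (PySem.List.slice t (some i) (some ((t.length : Int) + 1))))
        = (List.range t.length).map (fun i => String.mk (t.drop i ++ [])) := by
      rw [range_map_pyRange]
      apply List.map_congr_left
      intro k hk
      have : ((t.length : Int) + 1) = ((t.length + 1 : Nat) : Int) := by push_cast; ring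
      simp only [Int.ofNat_eq_natCast]
      rw [this, PySem.List.slice_natCast]
      simp only [List.append_nil]
      congr 1
      apply List.take_of_length_le
      simp only [List.length_drop]
      omega
    rw [hmap]
    exact (List.reverse_perm _).symm
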